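-- pv_equiv track=rewrite | github.com/bryanvillar69/firstproject | SLOT MACHINE.py | horizontal_score_line_two
-- ===== SOURCE A (Python) =====
-- def pattern_count_horizontal(run_length):
--     if run_length == 2:
--         return 2
--     elif run_length == 3:
--         return 3
--     elif run_length == 4:
--         return 5
--     elif run_length == 5:
--         return 10
--     else:
--         return 0
--
-- def horizontal_score_line_two(slot_line_two, h_score):  # horizontal score for line 2
--     run_length = 1
--     patterns_h2 = []
--     h_score_line_two = ""
--
--     for i in range(len(slot_line_two) - 1):
--         if slot_line_two[i] == slot_line_two[i + 1]:
--             run_length += 1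
--         else:
--             if run_length >= 2:
--                 patterns_h2.append(f"{slot_line_two[i]} x{run_length}")
--             h_score += pattern_count_horizontal(run_length)
--             run_length = 1
--
--     # append last run if >=2
--     if run_length >= 2:
--         patterns_h2.append(f"{slot_line_two[-1]} x{run_length}")
--     h_score += pattern_count_horizontal(run_length)
--
--     if patterns_h2:
--         for pattern in patterns_h2:
--             h_score_line_two += f" {pattern}"
--
--     return h_score, h_score_line_two
-- ===== SOURCE B (Python) =====
-- def horizontal_score_line_two(slot_line_two, h_score):  # horizontal score for line 2
--     n = len(slot_line_two)
--     # staged: run-start boundary indices, then run intervals by zipping with the shifted list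
--     starts = [i for i in range(n) if i == 0 or slot_line_two[i] != slot_line_two[i - 1]]
--     ends = starts[1:] + [n]
--     table = {2: 2, 3: 3, 4: 5, 5: 10}
--     score = h_score + sum(table.get(e - b, 0) for b, e in zip(starts, ends))
--     line = "".join(f" {slot_line_two[b]} x{e - b}" for b, e in zip(starts, ends) if e - b >= 2)
--     return score, line
-- ===== Notes on version B (the rewrite author's own statement) =====
-- stated objective: alternative
-- what changed: B replaces A's single streaming pass with a running run-length counter and flush branch by a staged, index-based computation: it first builds the list of run-start boundary indices, zips it with its shifted copy (plus the length sentinel) to get run intervals, scores each interval length through a dict table, and joins the pattern strings of intervals of length >= 2.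
import Mathlib
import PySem

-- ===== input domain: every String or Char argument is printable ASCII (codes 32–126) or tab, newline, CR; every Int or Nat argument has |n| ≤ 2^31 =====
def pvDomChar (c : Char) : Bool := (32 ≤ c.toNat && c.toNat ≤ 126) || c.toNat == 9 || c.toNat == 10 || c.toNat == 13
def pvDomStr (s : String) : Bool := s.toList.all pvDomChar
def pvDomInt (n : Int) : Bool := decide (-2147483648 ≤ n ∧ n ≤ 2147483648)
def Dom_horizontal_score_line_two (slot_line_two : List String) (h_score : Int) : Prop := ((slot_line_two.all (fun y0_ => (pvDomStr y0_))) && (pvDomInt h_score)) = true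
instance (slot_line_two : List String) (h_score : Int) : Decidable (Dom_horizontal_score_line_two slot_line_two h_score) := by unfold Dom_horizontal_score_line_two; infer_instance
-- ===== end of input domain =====

-- B replaces A's streaming run counter + flush branch by a staged boundary-index
-- computation (run-start indices, zipped into intervals, table-scored, joined);
-- same O(n) cost, a genuinely different decomposition.


-- ===== PORT A =====
def pattern_count_horizontal (run_length : Int) : Int :=
  if run_length = 2 then 2
  else if run_length = 3 then 3
  else if run_length = 4 then 5
  else if run_length = 5 then 10
  else 0

-- the body of A's 'for i in range(len(slot_line_two) - 1)' loop; state = (run_length, patterns_h2, h_score)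
def pvStepA (acc : Int × List String × Int) (a b : String) : Int × List String × Int :=
  if a == b then (acc.1 + 1, acc.2.1, acc.2.2)
  else (1,
        (if 2 ≤ acc.1 then acc.2.1 ++ [a ++ " x" ++ PySem.Int.toStr acc.1] else acc.2.1),
        acc.2.2 + pattern_count_horizontal acc.1)

def horizontal_score_line_two (slot_line_two : List String) (h_score : Int) : Int × String :=
  let st := (PySem.List.pyRange 0 ((slot_line_two.length : Int) - 1) 1).foldl
    (fun acc i => pvStepA acc (PySem.List.pyGetD slot_line_two i "") (PySem.List.pyGetD slot_line_two (i + 1) "")) (1, [], h_score)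
  -- append last run if >=2 (slot_line_two[-1]; only reached when the list is nonempty, where pyGetD = pyGet?)
  let patterns_h2 := if 2 ≤ st.1 then st.2.1 ++ [PySem.List.pyGetD slot_line_two (-1) "" ++ " x" ++ PySem.Int.toStr st.1] else st.2.1
  (st.2.2 + pattern_count_horizontal st.1,
   patterns_h2.foldl (fun acc p => acc ++ " " ++ p) "")

-- ===== PORT B =====
-- the score table {2: 2, 3: 3, 4: 5, 5: 10} of Source B
def pvTable : PySem.Dict Int Int := PySem.Dict.ofList [(2, 2), (3, 3), (4, 5), (5, 10)]

def horizontal_score_line_two_alt (slot_line_two : List String) (h_score : Int) : Int × String :=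
  let n := slot_line_two.length
  -- starts = [i for i in range(n) if i == 0 or s[i] != s[i-1]]  (Nat indices; all in range)
  let starts := (List.range n).filter
    (fun i => i == 0 || !(slot_line_two.getD i "" == slot_line_two.getD (i - 1) ""))
  let ends := starts.drop 1 ++ [n]
  let pairs := starts.zip ends
  let score := h_score + (pairs.map (fun p => pvTable.getD ((p.2 : Int) - (p.1 : Int)) 0)).sum
  let line := String.join (pairs.filterMap (fun p =>
      if 2 ≤ (p.2 : Int) - (p.1 : Int) then
        some (" " ++ slot_line_two.getD p.1 "" ++ " x" ++ PySem.Int.toStr ((p.2 : Int) - (p.1 : Int)))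
      else none))
  (score, line)

-- ===== PRECONDITION & SPEC =====
def Spec_horizontal_score_line_two (slot_line_two : List String) (h_score : Int) (out : Int × String) : Prop := out = horizontal_score_line_two_alt slot_line_two h_score
instance (slot_line_two : List String) (h_score : Int) (out : Int × String) : Decidable (Spec_horizontal_score_line_two slot_line_two h_score out) := by unfold Spec_horizontal_score_line_two; infer_instance

-- ===== CLAIM (what is proved, stated in full; the proofs are below) =====
def Claim_equal_horizontal_score_line_two : Prop := ∀ (slot_line_two : List String) (h_score : Int), Dom_horizontal_score_line_two slot_line_two h_score → Spec_horizontal_score_line_two slot_line_two h_score (horizontal_score_line_two slot_line_two h_score)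

-- ===== LEMMAS AND PROOFS =====

-- run-length encoding of the input, the common reference both ports are reduced to
def pvRunsAux (x : String) (k : Int) : List String → List (String × Int)
  | [] => [(x, k)]
  | y :: ys => if x == y then pvRunsAux x (k + 1) ys else (x, k) :: pvRunsAux y 1 ys

-- total pattern score of a run list
def pvSum (rs : List (String × Int)) : Int := (rs.map (fun r => pattern_count_horizontal r.2)).sum

-- the pattern strings (without the leading space) of the runs of length >= 2
def pvPats (rs : List (String × Int)) : List String :=
  rs.filterMap (fun r => if 2 ≤ r.2 then some (r.1 ++ " x" ++ PySem.Int.toStr r.2) else none)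

-- " p1 p2 …" for a list of pattern strings
def pvCat : List String → String
  | [] => ""
  | p :: ps => " " ++ p ++ pvCat ps

-- A's flush after the loop, at the (run_length, patterns, score) level
def pvFinishA (s : List String) (st : Int × List String × Int) : Int × List String :=
  (st.2.2 + pattern_count_horizontal st.1,
   if 2 ≤ st.1 then st.2.1 ++ [PySem.List.pyGetD s (-1) "" ++ " x" ++ PySem.Int.toStr st.1] else st.2.1)

-- an index loop over adjacent pairs is a fold over (s.zip s.tail)
theorem pv_range_pairs {α β : Type} (d : α) (g : β → α → α → β) :
    ∀ (xs : List α) (x : α) (init : β),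
      (List.range xs.length).foldl
          (fun acc i => g acc ((x :: xs).getD i d) ((x :: xs).getD (i + 1) d)) init
        = ((x :: xs).zip xs).foldl (fun acc p => g acc p.1 p.2) init := by
  intro xs
  induction xs with
  | nil => intro x init; simp
  | cons y ys ih =>
    intro x init
    rw [List.length_cons, List.range_succ_eq_map, List.foldl_cons, List.foldl_map]
    simpa using ih y (g init x y)

-- the loop + flush computes score and patterns of the consecutive runs
theorem pv_main : ∀ (xs : List String) (x : String) (rl : Int) (pats : List String) (hs : Int),
    pvFinishA (x :: xs) (((x :: xs).zip xs).foldl (fun acc p => pvStepA acc p.1 p.2) (rl, pats, hs))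
      = (hs + pvSum (pvRunsAux x rl xs), pats ++ pvPats (pvRunsAux x rl xs)) := by
  intro xs
  induction xs with
  | nil =>
    intro x rl pats hs
    simp only [List.zip_nil_right, List.foldl_nil, pvFinishA, pvRunsAux, pvSum, pvPats,
      List.map_cons, List.map_nil, List.sum_cons, List.sum_nil, List.filterMap]
    rw [PySem.List.pyGetD_neg_one _ _ (by simp)]
    by_cases h2 : 2 ≤ rl <;> simp [h2]
  | cons y ys ih =>
    intro x rl pats hs
    rw [List.zip_cons_cons, List.foldl_cons]
    have hlast : pvFinishA (x :: y :: ys) = pvFinishA (y :: ys) := by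
      funext st
      simp only [pvFinishA]
      rw [PySem.List.pyGetD_neg_one _ _ (by simp), PySem.List.pyGetD_neg_one _ _ (by simp),
        List.getLast_cons (by simp)]
    rw [hlast]
    by_cases hxy : x == y
    · have hx : x = y := by simpa using hxy
      subst hx
      have hstep : pvStepA (rl, pats, hs) x x = (rl + 1, pats, hs) := by simp [pvStepA]
      rw [hstep, ih x (rl + 1) pats hs]
      simp [pvRunsAux]
    · have hxy' : (x == y) = false := by simpa using hxy
      have hstep : pvStepA (rl, pats, hs) x y
          = (1, (if 2 ≤ rl then pats ++ [x ++ " x" ++ PySem.Int.toStr rl] else pats),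
             hs + pattern_count_horizontal rl) := by
        simp [pvStepA, hxy']
      rw [hstep, ih y 1 _ _]
      simp only [pvRunsAux, hxy', Bool.false_eq_true, if_false, pvSum, pvPats, List.map_cons,
        List.sum_cons, List.filterMap_cons, Prod.mk.injEq]
      constructor
      · ring
      · by_cases h2 : 2 ≤ rl <;> simp [h2]

-- A's pattern join loop
theorem pv_lineA : ∀ (l : List String) (a : String),
    l.foldl (fun acc p => acc ++ " " ++ p) a = a ++ pvCat l := by
  intro l
  induction l with
  | nil => intro a; simp [pvCat]
  | cons p ps ih => intro a; rw [List.foldl_cons, ih]; simp [pvCat, String.append_assoc]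

-- A, reduced to the run list
theorem pvA_runs (x : String) (xs : List String) (h : Int) :
    horizontal_score_line_two (x :: xs) h
      = (h + pvSum (pvRunsAux x 1 xs), pvCat (pvPats (pvRunsAux x 1 xs))) := by
  simp only [horizontal_score_line_two]
  have hlen : ((List.length (x :: xs) : Int) - 1) = ((xs.length : Nat) : Int) := by simp
  rw [hlen, PySem.List.pyRange_zero_natCast, List.foldl_map]
  have hidx : List.foldl
      (fun acc i => pvStepA acc (PySem.List.pyGetD (x :: xs) ((i : Nat) : Int) "")
        (PySem.List.pyGetD (x :: xs) (((i : Nat) : Int) + 1) "")) (1, [], h) (List.range xs.length)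
      = ((x :: xs).zip xs).foldl (fun acc p => pvStepA acc p.1 p.2) (1, [], h) := by
    rw [← pv_range_pairs "" (fun acc a b => pvStepA acc a b) xs x (1, [], h)]
    refine PySem.List.foldl_congr_mem _ _ _ _ (fun acc i hi => ?_)
    have h1 : ((i : Int) + 1) = ((i + 1 : Nat) : Int) := by push_cast; ring
    rw [h1, PySem.List.pyGetD_natCast, PySem.List.pyGetD_natCast]
  rw [hidx]
  have hm := pv_main xs x 1 [] h
  simp only [pvFinishA, List.nil_append, Prod.ext_iff] at hm
  rw [pv_lineA]
  exact Prod.ext_iff.mpr ⟨hm.1, by rw [hm.2, String.empty_append]⟩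

-- B-side: the dict table is pattern_count_horizontal
theorem pv_table (l : Int) : pvTable.getD l 0 = pattern_count_horizontal l := by
  have hd : pvTable = PySem.Dict.mk [(2, 2), (3, 3), (4, 5), (5, 10)] := by
    apply PySem.Dict.ext; decide
  rw [hd]
  by_cases h2 : l = 2
  · subst h2; decide
  · by_cases h3 : l = 3
    · subst h3; decide
    · by_cases h4 : l = 4
      · subst h4; decide
      · by_cases h5 : l = 5
        · subst h5; decide
        · have e2 : ((2 : Int) == l) = false := by simp; omega
          have e3 : ((3 : Int) == l) = false := by simp; omega
          have e4 : ((4 : Int) == l) = false := by simp; omega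
          have e5 : ((5 : Int) == l) = false := by simp; omega
          simp [PySem.Dict.getD, PySem.Dict.get?_mk_cons, e2, e3, e4, e5,
            pattern_count_horizontal, h2, h3, h4, h5, PySem.Dict.get?]

-- the run-start indices of the tail, generalized over the previous symbol and offset
def pvStartsG : String → Nat → List String → List Nat
  | _, _, [] => []
  | prev, off, a :: t => if a == prev then pvStartsG a (off + 1) t else off :: pvStartsG a (off + 1) t

-- B's filter over range computes pvStartsG on the tail
theorem pv_starts_eq : ∀ (t s : List String) (off : Nat) (prev : String),
    1 ≤ off → s.drop off = t → s.getD (off - 1) "" = prev →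
    (List.range' off t.length).filter (fun i => i == 0 || !(s.getD i "" == s.getD (i - 1) ""))
      = pvStartsG prev off t := by
  intro t
  induction t with
  | nil => intro s off prev _ _ _; simp [pvStartsG]
  | cons a t' ih =>
    intro s off prev hoff hdrop hprev
    have hget : s.getD off "" = a := by
      have hcell : s[off]? = some a := by
        have h0 : (s.drop off)[0]? = s[off + 0]? := List.getElem?_drop
        rw [hdrop] at h0
        simpa using h0.symm
      simp [List.getD_eq_getElem?_getD, hcell]
    have hdrop' : s.drop (off + 1) = t' := by
      have hdd := congrArg (List.drop 1) hdrop
      rw [List.drop_drop, List.drop_one, List.tail_cons] at hdd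
      simpa [Nat.add_comm] using hdd
    have hprev' : s.getD (off + 1 - 1) "" = a := by simpa using hget
    have hrec := ih s (off + 1) a (by omega) hdrop' hprev'
    rw [List.length_cons, List.range'_succ, List.filter_cons]
    have hoff0 : (off == 0) = false := by simp; omega
    by_cases hap : a == prev
    · have hcond : (off == 0 || !(s.getD off "" == s.getD (off - 1) "")) = false := by
        rw [hget, hprev]; simp [hoff0, hap]
      simp only [hcond, Bool.false_eq_true, if_false, pvStartsG, hap, if_true]
      exact hrec
    · have hap' : (a == prev) = false := by simpa using hap
      have hcond : (off == 0 || !(s.getD off "" == s.getD (off - 1) "")) = true := by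
        rw [hget, hprev]; simp [hap']
      simp only [hcond, if_true, pvStartsG, hap', Bool.false_eq_true, if_false]
      rw [hrec]

-- the zipped (start, end) intervals name exactly the consecutive runs
theorem pv_pairs_runs : ∀ (t s : List String) (off kstart : Nat) (prev : String),
    s.drop off = t → off ≤ s.length → kstart < off →
    (∀ j, kstart ≤ j → j < off → s.getD j "" = prev) →
    ((kstart :: pvStartsG prev off t).zip (pvStartsG prev off t ++ [s.length])).map
        (fun p => (s.getD p.1 "", ((p.2 : Nat) : Int) - ((p.1 : Nat) : Int)))
      = pvRunsAux prev ((off : Int) - (kstart : Int)) t := by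
  intro t
  induction t with
  | nil =>
    intro s off kstart prev hdrop hle hk hrun
    have hlen : s.length = off := by
      have := List.drop_eq_nil_iff.mp hdrop
      omega
    simp only [pvStartsG, List.nil_append, List.zip_cons_cons, List.zip_nil_right, List.map_cons,
      List.map_nil, pvRunsAux, hlen]
    rw [hrun kstart le_rfl hk]
  | cons a t' ih =>
    intro s off kstart prev hdrop hle hk hrun
    have hget : s.getD off "" = a := by
      have hcell : s[off]? = some a := by
        have h0 : (s.drop off)[0]? = s[off + 0]? := List.getElem?_drop
        rw [hdrop] at h0
        simpa using h0.symm
      simp [List.getD_eq_getElem?_getD, hcell]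
    have hdrop' : s.drop (off + 1) = t' := by
      have hdd := congrArg (List.drop 1) hdrop
      rw [List.drop_drop, List.drop_one, List.tail_cons] at hdd
      simpa [Nat.add_comm] using hdd
    have hle' : off + 1 ≤ s.length := by
      have hll := congrArg List.length hdrop
      rw [List.length_drop] at hll
      simp at hll
      omega
    by_cases hap : a == prev
    · have ha : a = prev := by simpa using hap
      subst ha
      have hrun' : ∀ j, kstart ≤ j → j < off + 1 → s.getD j "" = a := by
        intro j hj1 hj2
        by_cases hj : j < off
        · exact hrun j hj1 hj
        · have hje : j = off := by omega
          rw [hje, hget]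
      have hrec := ih s (off + 1) kstart a hdrop' hle' (by omega) hrun'
      push_cast at hrec
      simp only [pvStartsG, hap, if_true, pvRunsAux, beq_self_eq_true]
      rw [show ((off : Int) + 1 - (kstart : Int)) = ((off : Int) - kstart) + 1 from by ring] at hrec
      exact hrec
    · have hap' : (a == prev) = false := by simpa using hap
      have hrun' : ∀ j, off ≤ j → j < off + 1 → s.getD j "" = a := by
        intro j hj1 hj2
        have hje : j = off := by omega
        rw [hje, hget]
      have hrec := ih s (off + 1) off a hdrop' hle' (by omega) hrun'
      push_cast at hrec
      rw [show ((off : Int) + 1 - (off : Int)) = 1 from by ring] at hrec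
      simp only [pvStartsG, hap', Bool.false_eq_true, if_false, pvRunsAux]
      rw [List.cons_append, List.zip_cons_cons, List.map_cons]
      rw [hrun kstart le_rfl hk]
      rw [hrec]
      have hbeq : (prev == a) = false := by
        simp only [beq_eq_false_iff_ne] at hap' ⊢
        exact fun h => hap' h.symm
      rw [hbeq]
      simp

-- join of B's interval pattern strings = pvCat of the run patterns
theorem pv_join_nil : String.join [] = "" := rfl

theorem pv_foldl_str_aux : ∀ (l : List String) (b : String),
    l.foldl (· ++ ·) b = b ++ String.join l := by
  intro l
  induction l with
  | nil => intro b; rw [List.foldl_nil, pv_join_nil]; simp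
  | cons a l ih =>
    intro b
    have hj : String.join (a :: l) = ("" ++ a) ++ String.join l := by
      show List.foldl (· ++ ·) "" (a :: l) = _
      rw [List.foldl_cons, ih]
    rw [List.foldl_cons, ih, hj]
    simp [String.append_assoc]

theorem pv_join_cons (a : String) (l : List String) :
    String.join (a :: l) = a ++ String.join l := by
  show List.foldl (· ++ ·) "" (a :: l) = _
  rw [List.foldl_cons, pv_foldl_str_aux]
  simp

theorem pv_joinB : ∀ (rs : List (String × Int)),
    String.join (rs.filterMap (fun r =>
        if 2 ≤ r.2 then some (" " ++ r.1 ++ " x" ++ PySem.Int.toStr r.2) else none))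
      = pvCat (pvPats rs) := by
  intro rs
  induction rs with
  | nil => simp [pvPats, pvCat, pv_join_nil]
  | cons r rs ih =>
    simp only [pvPats, List.filterMap_cons] at ih ⊢
    by_cases h2 : 2 ≤ r.2
    · simp only [h2, if_true]
      rw [pv_join_cons, ih]
      simp [pvCat, String.append_assoc]
    · simp only [h2, if_false]
      exact ih

-- B, reduced to the run list
theorem pvB_runs (x : String) (xs : List String) (h : Int) :
    horizontal_score_line_two_alt (x :: xs) h
      = (h + pvSum (pvRunsAux x 1 xs), pvCat (pvPats (pvRunsAux x 1 xs))) := by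
  have hstarts : (List.range (x :: xs).length).filter
      (fun i => i == 0 || !((x :: xs).getD i "" == (x :: xs).getD (i - 1) ""))
      = 0 :: pvStartsG x 1 xs := by
    have h0 := pv_starts_eq xs (x :: xs) 1 x le_rfl (by simp) (by simp)
    rw [List.length_cons, List.range_eq_range', List.range'_succ, List.filter_cons, h0]
    simp
  have hpairs := pv_pairs_runs xs (x :: xs) 1 0 x (by simp) (by simp) (by omega)
    (by intro j h1 h2; have : j = 0 := by omega
        simp [this])
  simp only [Nat.cast_zero, Nat.cast_one, sub_zero] at hpairs
  simp only [horizontal_score_line_two_alt, hstarts, List.drop_one, List.tail_cons]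
  refine Prod.ext_iff.mpr ⟨?_, ?_⟩
  · -- score component
    show h + _ = h + pvSum (pvRunsAux x 1 xs)
    congr 1
    have hmm : ((0 :: pvStartsG x 1 xs).zip (pvStartsG x 1 xs ++ [(x :: xs).length])).map
        (fun p => pvTable.getD (((p.2 : Nat) : Int) - ((p.1 : Nat) : Int)) 0)
        = (pvRunsAux x 1 xs).map (fun r => pattern_count_horizontal r.2) := by
      rw [← hpairs, List.map_map]
      apply List.map_congr_left
      intro p _
      exact pv_table _
    rw [pvSum, ← hmm]
  · -- line component
    show String.join _ = pvCat (pvPats (pvRunsAux x 1 xs))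
    have hfm : ((0 :: pvStartsG x 1 xs).zip (pvStartsG x 1 xs ++ [(x :: xs).length])).filterMap
        (fun p => if 2 ≤ ((p.2 : Nat) : Int) - ((p.1 : Nat) : Int) then
            some (" " ++ (x :: xs).getD p.1 "" ++ " x" ++ PySem.Int.toStr (((p.2 : Nat) : Int) - ((p.1 : Nat) : Int)))
          else none)
        = (pvRunsAux x 1 xs).filterMap
            (fun r => if 2 ≤ r.2 then some (" " ++ r.1 ++ " x" ++ PySem.Int.toStr r.2) else none) := by
      rw [← hpairs, List.filterMap_map]
      rfl
    rw [hfm, pv_joinB]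

-- ===== VERDICT (by name: the statement is the Claim_ definition above) =====
theorem horizontal_score_line_two_spec : Claim_equal_horizontal_score_line_two := by
  intro s h _
  unfold Spec_horizontal_score_line_two
  cases s with
  | nil =>
    show horizontal_score_line_two [] h = horizontal_score_line_two_alt [] h
    simp [horizontal_score_line_two, horizontal_score_line_two_alt, pv_join_nil,
      pattern_count_horizontal, show PySem.List.pyRange 0 (-1) 1 = [] from by decide]
  | cons x xs =>
    rw [pvA_runs, pvB_runs]
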